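-- pv_equiv track=rewrite | github.com/yiyaoshang/learnpython | 007/test/cre_get_date.py | column_info
-- ===== SOURCE A (Python) =====
-- def column_info(table_info):
--     col_info = []
--     for i,column in enumerate(table_info):
--         b = {}
--         if i != len(table_info) - 1:
--             b["col"] = column[2] + ","
--             col_info.append(b)
--         else:
--             b["col"] = column[2]
--             col_info.append(b)
--     return col_info
-- ===== SOURCE B (Python) =====
-- def column_info(table_info):
--     if not table_info:
--         return []
--     head = table_info[0]
--     rest = table_info[1:]
--     if not rest:
--         return [{"col": head[2]}]
--     return [{"col": head[2] + ","}] + column_info(rest)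
-- ===== Notes on version B (the rewrite author's own statement) =====
-- stated objective: alternative
-- what changed: B is head-recursive on the list structure: the 'last element' test of A's indexed loop disappears, becoming the singleton base case of the recursion; each step prepends the comma entry for the head and recurses on the tail.
import Mathlib
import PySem

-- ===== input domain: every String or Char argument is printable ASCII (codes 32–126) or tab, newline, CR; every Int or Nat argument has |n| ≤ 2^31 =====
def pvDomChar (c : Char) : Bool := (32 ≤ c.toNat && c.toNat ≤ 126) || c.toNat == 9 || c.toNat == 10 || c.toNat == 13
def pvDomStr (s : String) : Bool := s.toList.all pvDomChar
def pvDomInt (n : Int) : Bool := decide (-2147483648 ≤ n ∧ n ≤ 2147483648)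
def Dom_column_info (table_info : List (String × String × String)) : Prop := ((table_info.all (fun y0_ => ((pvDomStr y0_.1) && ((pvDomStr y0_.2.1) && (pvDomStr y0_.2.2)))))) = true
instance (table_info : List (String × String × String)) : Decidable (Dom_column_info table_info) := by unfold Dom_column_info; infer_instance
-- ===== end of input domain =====

-- B replaces A's indexed loop (with its per-iteration last-index test) by structural recursion:
-- the singleton list is the no-comma base case; otherwise the head's comma entry is prepended
-- and the tail is processed recursively (objective: alternative decomposition).

-- ===== PORT A =====
def column_info (table_info : List (String × String × String)) : List (List (String × String)) :=
  (PySem.List.enumerate table_info).foldl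
    (fun col_info ic =>
      if ic.1 ≠ (table_info.length : Int) - 1 then
        col_info ++ [[("col", ic.2.2.2 ++ ",")]]
      else
        col_info ++ [[("col", ic.2.2.2)]])
    []

-- ===== PORT B =====
def column_info_alt : List (String × String × String) → List (List (String × String))
  | [] => []
  | [head] => [[("col", head.2.2)]]
  | head :: rest₁ :: rest₂ =>
      [("col", head.2.2 ++ ",")] :: column_info_alt (rest₁ :: rest₂)

-- ===== PRECONDITION & SPEC =====
def Spec_column_info (table_info : List (String × String × String)) (out : List (List (String × String))) : Prop := out = column_info_alt table_info
instance (table_info : List (String × String × String)) (out : List (List (String × String))) : Decidable (Spec_column_info table_info out) := by unfold Spec_column_info; infer_instance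

-- ===== CLAIM (what is proved, stated in full; the proofs are below) =====
def Claim_equal_column_info : Prop := ∀ (table_info : List (String × String × String)), Dom_column_info table_info → Spec_column_info table_info (column_info table_info)

-- ===== LEMMAS AND PROOFS =====

-- A's loop only ever appends one element per step, so it is a map over the enumerated list.
theorem column_info_foldl_map (l : List (Int × (String × String × String))) (n : Int)
    (acc : List (List (String × String))) :
    l.foldl
      (fun col_info ic =>
        if ic.1 ≠ n then col_info ++ [[("col", ic.2.2.2 ++ ",")]]
        else col_info ++ [[("col", ic.2.2.2)]]) acc
    = acc ++ l.map (fun ic =>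
        if ic.1 ≠ n then [("col", ic.2.2.2 ++ ",")] else [("col", ic.2.2.2)]) := by
  induction l generalizing acc with
  | nil => simp
  | cons h t ih =>
    rw [List.foldl_cons, ih, List.map_cons]
    by_cases hc : h.1 = n <;> simp [hc]

-- The mapped enumerate, generalized over the start offset: if the offset plus the list length
-- equals n + 1 then only the final element takes the no-comma branch, matching B's recursion.
theorem column_info_map_enum (l : List (String × String × String)) (k : Nat) (n : Int)
    (hk : (k : Int) + l.length = n + 1) :
    (PySem.List.enumerate l (k : Int)).map (fun ic =>
        if ic.1 ≠ n then [("col", ic.2.2.2 ++ ",")] else [("col", ic.2.2.2)])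
    = column_info_alt l := by
  induction l generalizing k with
  | nil => rfl
  | cons h t ih =>
    rw [PySem.List.enumerate_cons, List.map_cons]
    cases t with
    | nil =>
      simp only [List.length_cons, List.length_nil] at hk
      have hkn : (k : Int) = n := by omega
      simp [column_info_alt, PySem.List.enumerate, hkn]
    | cons t₁ t₂ =>
      have hne : (k : Int) ≠ n := by
        simp only [List.length_cons] at hk
        push_cast at hk ⊢
        omega
      have hrec : ((k : Int) + 1) = ((k + 1 : Nat) : Int) := by push_cast; ring
      rw [if_pos hne, hrec, ih (k + 1) (by simp only [List.length_cons] at hk ⊢; push_cast at hk ⊢; omega)]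
      rfl

-- ===== VERDICT (by name: the statement is the Claim_ definition above) =====
theorem column_info_spec : Claim_equal_column_info := by
  intro table_info _
  unfold Spec_column_info column_info
  rw [column_info_foldl_map, List.nil_append]
  have h0 : ((0 : Nat) : Int) = (0 : Int) := rfl
  rw [← h0, column_info_map_enum table_info 0 ((table_info.length : Int) - 1) (by push_cast; ring)]
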